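-- pv_equiv track=rewrite | github.com/cryogenic22/proto_demo | src/smb/core/context.py | _find_text_for_sections
-- ===== SOURCE A (Python) =====
-- def _find_text_for_sections(
--     section_texts: dict[str, str], search_sections: list[str],
--     search_keywords: list[str] | None = None,
-- ) -> str:
--     """Find and concatenate text from target sections."""
--     texts = []
--     for sec_num in search_sections:
--         if sec_num in section_texts:
--             texts.append(section_texts[sec_num])
--         # Also search subsections (5 → 5.1, 5.2, etc.)
--         for key, text in section_texts.items():
--             if key.startswith(sec_num + "."):
--                 texts.append(text)
--
--     combined = " ".join(texts)
--
--     # If keywords specified, also search by title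
--     if search_keywords and not combined.strip():
--         for key, text in section_texts.items():
--             if key.startswith("_title_"):
--                 title = key.replace("_title_", "")
--                 if any(kw in title for kw in search_keywords):
--                     combined += " " + text
--
--     return combined
-- ===== SOURCE B (Python) =====
-- def _find_text_for_sections(section_texts, search_sections, search_keywords=None):
--     # Map each searched section number to all of its positions in search_sections.
--     pos = {}
--     for i, sec in enumerate(search_sections):
--         pos.setdefault(sec, []).append(i)
--     # One pass over section_texts: each key feeds the buckets of every searched
--     # section that is a dot-ancestor prefix of the key.
--     buckets = [[] for _ in search_sections]
--     for key, text in section_texts.items():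
--         for j, ch in enumerate(key):
--             if ch == ".":
--                 for i in pos.get(key[:j], ()):
--                     buckets[i].append(text)
--     parts = []
--     for i, sec in enumerate(search_sections):
--         if sec in section_texts:
--             parts.append(section_texts[sec])
--         parts.extend(buckets[i])
--     combined = " ".join(parts)
--     if search_keywords and not combined.strip():
--         for key, text in section_texts.items():
--             if key.startswith("_title_"):
--                 title = key.replace("_title_", "")
--                 if any(kw in title for kw in search_keywords):
--                     combined += " " + text
--     return combined
-- ===== Notes on version B (the rewrite author's own statement) =====
-- stated objective: faster
-- what changed: A rescans the whole dict for every searched section (startswith test per pair); B builds a position index of the searched sections once and makes a single pass over the dict, matching each key's dot-ancestor prefixes against the index and bucketing texts by search position.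
import Mathlib
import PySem

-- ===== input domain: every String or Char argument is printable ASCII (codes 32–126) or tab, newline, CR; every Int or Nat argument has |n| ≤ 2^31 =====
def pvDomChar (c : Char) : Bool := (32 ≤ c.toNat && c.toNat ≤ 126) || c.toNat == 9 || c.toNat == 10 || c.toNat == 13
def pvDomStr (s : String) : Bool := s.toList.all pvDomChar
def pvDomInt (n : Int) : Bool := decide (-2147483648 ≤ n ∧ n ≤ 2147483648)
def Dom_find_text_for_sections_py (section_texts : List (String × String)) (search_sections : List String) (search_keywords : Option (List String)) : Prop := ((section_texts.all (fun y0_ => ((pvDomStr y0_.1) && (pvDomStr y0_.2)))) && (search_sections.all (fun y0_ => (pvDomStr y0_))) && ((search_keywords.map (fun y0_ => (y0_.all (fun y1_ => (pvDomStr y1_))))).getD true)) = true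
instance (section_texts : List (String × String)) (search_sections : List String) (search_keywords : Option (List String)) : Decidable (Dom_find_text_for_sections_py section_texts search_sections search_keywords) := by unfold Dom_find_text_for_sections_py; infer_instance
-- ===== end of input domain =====

-- B replaces A's nested scan (every section number against every key) by one pass over the
-- keys, bucketing each key's text under the positions of its dot-ancestor prefixes.

-- ===== PORT A =====
-- A-side helper: the 'texts' list built by A's nested loops
def pvA_texts (st : List (String × String)) (ss : List String) : List String :=
  ss.foldl (fun texts sec =>
    st.foldl (fun texts kv =>
        if PySem.Str.startswith kv.1 (sec ++ ".") then texts ++ [kv.2] else texts)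
      (match (PySem.Dict.mk st).get? sec with
        | some t => texts ++ [t]
        | none => texts)) []

-- shared helper: the keyword/title fallback loop ('combined += " " + text'), textually identical in Source A and Source B
def pvTitleTail (st : List (String × String)) (kws : List String) (combined : String) : String :=
  st.foldl (fun c kv =>
    if PySem.Str.startswith kv.1 "_title_" then
      let title := PySem.Str.replace kv.1 "_title_" ""
      if kws.any (fun kw => PySem.Str.isIn kw title) then c ++ " " ++ kv.2 else c
    else c) combined

def find_text_for_sections_py (section_texts : List (String × String)) (search_sections : List String) (search_keywords : Option (List String)) : String :=
  let combined := PySem.Str.join " " (pvA_texts section_texts search_sections)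
  match search_keywords with
  | none => combined
  | some kws =>
      if !kws.isEmpty && (PySem.Str.strip combined == "") then
        pvTitleTail section_texts kws combined
      else combined

-- ===== PORT B =====
-- B-side helper: pos = {sec: [positions in search_sections]}
def pvB_pos (ss : List String) : PySem.Dict String (List Int) :=
  (PySem.List.enumerate ss).foldl (fun d p => d.modify p.2 [] (· ++ [p.1])) PySem.Dict.empty

-- B-side helper: one key's inner scan ('for j, ch in enumerate(key): ...')
def pvB_scanKey (pos : PySem.Dict String (List Int)) (key text : String)
    (buckets : List (List String)) : List (List String) :=
  (PySem.List.enumerate key.toList).foldl (fun bs p =>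
    if p.2 = '.' then
      (pos.getD (PySem.Str.slice key none (some p.1)) []).foldl
        (fun bs i => PySem.List.pySetD bs i (PySem.List.pyGetD bs i [] ++ [text])) bs
    else bs) buckets

-- B-side helper: the single pass over section_texts filling the buckets
def pvB_buckets (st : List (String × String)) (ss : List String) : List (List String) :=
  st.foldl (fun bs kv => pvB_scanKey (pvB_pos ss) kv.1 kv.2 bs) (ss.map fun _ => [])

-- B-side helper: assembling 'parts' in search order
def pvB_parts (st : List (String × String)) (ss : List String) (bk : List (List String)) : List String :=
  (PySem.List.enumerate ss).foldl (fun parts p =>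
    (match (PySem.Dict.mk st).get? p.2 with
      | some t => parts ++ [t]
      | none => parts) ++ PySem.List.pyGetD bk p.1 []) []

def find_text_for_sections_py_alt (section_texts : List (String × String)) (search_sections : List String) (search_keywords : Option (List String)) : String :=
  let buckets := pvB_buckets section_texts search_sections
  let combined := PySem.Str.join " " (pvB_parts section_texts search_sections buckets)
  match search_keywords with
  | none => combined
  | some kws =>
      if !kws.isEmpty && (PySem.Str.strip combined == "") then
        pvTitleTail section_texts kws combined
      else combined

-- ===== PRECONDITION & SPEC =====
def Spec_find_text_for_sections_py (section_texts : List (String × String)) (search_sections : List String) (search_keywords : Option (List String)) (out : String) : Prop := out = find_text_for_sections_py_alt section_texts search_sections search_keywords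
instance (section_texts : List (String × String)) (search_sections : List String) (search_keywords : Option (List String)) (out : String) : Decidable (Spec_find_text_for_sections_py section_texts search_sections search_keywords out) := by unfold Spec_find_text_for_sections_py; infer_instance

-- ===== CLAIM (what is proved, stated in full; the proofs are below) =====
def Claim_equal_find_text_for_sections_py : Prop := ∀ (section_texts : List (String × String)) (search_sections : List String) (search_keywords : Option (List String)), Dom_find_text_for_sections_py section_texts search_sections search_keywords → Spec_find_text_for_sections_py section_texts search_sections search_keywords (find_text_for_sections_py section_texts search_sections search_keywords)

-- ===== LEMMAS AND PROOFS =====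

-- position lists: pos[sec] is the list of indices of sec in ss
def pvIdx (ss : List String) (sec : String) : List Int :=
  ((PySem.List.enumerate ss).filter (fun p => p.2 == sec)).map (·.1)

theorem pvB_pos_getD (ss : List String) (sec : String) :
    (pvB_pos ss).getD sec [] = pvIdx ss sec := by
  unfold pvB_pos pvIdx
  have h1 : (PySem.List.enumerate ss).foldl (fun d p => d.modify p.2 [] (· ++ [p.1])) PySem.Dict.empty
      = ((PySem.List.enumerate ss).map (fun p => (p.2, p.1))).foldl
          (fun d q => d.modify q.1 [] (· ++ [q.2])) PySem.Dict.empty := by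
    rw [List.foldl_map]
  rw [h1, PySem.Dict.getD_foldl_modify_append, PySem.Dict.getD_empty]
  simp [List.filter_map, List.map_map, Function.comp_def]


theorem pvIdx_mem (ss : List String) (sec : String) (i : Int) (h : i ∈ pvIdx ss sec) :
    ∃ k : Nat, i = (k : Int) ∧ k < ss.length := by
  unfold pvIdx at h
  simp only [List.mem_map, List.mem_filter] at h
  obtain ⟨p, ⟨hp, _⟩, rfl⟩ := h
  rw [PySem.List.mem_enumerate_iff] at hp
  obtain ⟨k, hk, rfl⟩ := hp
  exact ⟨k, by simp, hk⟩


theorem pvIdx_count (ss : List String) (sec : String) (k : Nat) (hk : k < ss.length) :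
    (pvIdx ss sec).count (k : Int) = if ss[k] = sec then 1 else 0 := by
  have hpw : (pvIdx ss sec).Pairwise (· < ·) := by
    unfold pvIdx
    exact ((PySem.List.pairwise_lt_enumerate ss 0).filter _).map _ (fun _ _ h => h)
  have hnd : (pvIdx ss sec).Nodup := hpw.imp (fun h => ne_of_lt h)
  have hmem : (k : Int) ∈ pvIdx ss sec ↔ ss[k] = sec := by
    unfold pvIdx
    simp only [List.mem_map, List.mem_filter, PySem.List.mem_enumerate_iff]
    constructor
    · rintro ⟨p, ⟨⟨j, hj, rfl⟩, hsec⟩, hfst⟩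
      simp only [beq_iff_eq] at hsec
      have : j = k := by omega
      subst this; exact hsec
    · intro h
      exact ⟨((k : Int), ss[k]), ⟨⟨k, hk, by simp⟩, by simp [h]⟩, rfl⟩
  by_cases h : ss[k] = sec
  · simp [h, List.count_eq_one_of_mem hnd (hmem.mpr h)]
  · simp [h, List.count_eq_zero_of_not_mem (fun hm => h (hmem.mp hm))]


-- the append-to-bucket inner loop, pointwise
theorem pvApply_getD (idxs : List Int) (t : String) (bs : List (List String))
    (hb : ∀ i ∈ idxs, ∃ m : Nat, i = (m : Int) ∧ m < bs.length) (k : Nat) :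
    (idxs.foldl (fun bs i => PySem.List.pySetD bs i (PySem.List.pyGetD bs i [] ++ [t])) bs).getD k []
      = bs.getD k [] ++ List.replicate (idxs.count (k : Int)) t := by
  induction idxs generalizing bs with
  | nil => simp
  | cons i idxs ih =>
    obtain ⟨m, rfl, hm⟩ := hb i (by simp)
    simp only [List.foldl_cons, PySem.List.pySetD_natCast, PySem.List.pyGetD_natCast]
    rw [ih _ (by
      intro j hj
      obtain ⟨m', h1, h2⟩ := hb j (by simp [hj])
      exact ⟨m', h1, by simpa using h2⟩)]
    by_cases hkm : k = m
    · subst hkm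
      have hset : (bs.set k (bs.getD k [] ++ [t])).getD k [] = bs.getD k [] ++ [t] := by
        simp [List.getD_eq_getElem?_getD, hm]
      rw [hset]
      have hc : (((k:Int) :: idxs).count (k:Int)) = idxs.count (k:Int) + 1 := by simp
      rw [hc, List.append_assoc]
      congr 1
    · have hset : (bs.set m (bs.getD m [] ++ [t])).getD k [] = bs.getD k [] := by
        simp [List.getD_eq_getElem?_getD, show m ≠ k from fun h => hkm h.symm]
      rw [hset]
      have hc : (((m:Int) :: idxs).count (k:Int)) = idxs.count (k:Int) := by
        simp only [List.count_cons]
        have : ¬ ((m:Int) == (k:Int)) := by simpa using fun h => hkm (by exact_mod_cast h.symm)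
        simp [this]
      rw [hc]


theorem pvApply_length (idxs : List Int) (t : String) (bs : List (List String)) :
    (idxs.foldl (fun bs i => PySem.List.pySetD bs i (PySem.List.pyGetD bs i [] ++ [t])) bs).length
      = bs.length := by
  induction idxs generalizing bs with
  | nil => rfl
  | cons i idxs ih =>
    rw [List.foldl_cons, ih]
    exact PySem.List.length_pySetD _ _ _


-- dot-prefix occurrence count in a key
theorem pvDotCount (cs : List Char) (pfx : List Char) :
    ((PySem.List.enumerate cs).countP
        (fun p => decide (p.2 = '.') && decide (pfx = PySem.Chars.slice cs none (some p.1))))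
      = if pfx ++ ['.'] <+: cs then 1 else 0 := by
  induction cs using List.reverseRecOn with
  | nil => simp [PySem.List.enumerate]
  | append_singleton cs c ih =>
    rw [PySem.List.enumerate_append, List.countP_append]
    have hfirst : ((PySem.List.enumerate cs).countP
        (fun p => decide (p.2 = '.') && decide (pfx = PySem.Chars.slice (cs ++ [c]) none (some p.1))))
        = ((PySem.List.enumerate cs).countP
        (fun p => decide (p.2 = '.') && decide (pfx = PySem.Chars.slice cs none (some p.1)))) := by
      apply List.countP_congr
      intro p hp
      rw [PySem.List.mem_enumerate_iff] at hp
      obtain ⟨j, hj, rfl⟩ := hp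
      simp only [PySem.Chars.slice_eq_listSlice, zero_add, PySem.List.slice_to_natCast,
        List.take_append_of_le_length (le_of_lt hj)]
    have hlast : ((PySem.List.enumerate ([c] : List Char) ((0:Int) + (cs.length : Int))).countP
        (fun p => decide (p.2 = '.') && decide (pfx = PySem.Chars.slice (cs ++ [c]) none (some p.1))))
        = if c = '.' ∧ pfx = cs then 1 else 0 := by
      simp only [PySem.List.enumerate_cons, PySem.List.enumerate_nil]
      simp [PySem.Chars.slice_eq_listSlice, List.countP_cons]
    rw [hfirst, hlast, ih]
    by_cases h1 : pfx ++ ['.'] <+: cs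
    · have hne : ¬ (c = '.' ∧ pfx = cs) := by
        rintro ⟨-, rfl⟩
        have := h1.length_le
        simp at this
      have h2 : pfx ++ ['.'] <+: cs ++ [c] := h1.trans (List.prefix_append cs [c])
      simp [h1, h2, hne]
    · by_cases h3 : c = '.' ∧ pfx = cs
      · obtain ⟨rfl, rfl⟩ := h3
        simp [h1]
      · have h4 : ¬ (pfx ++ ['.'] <+: cs ++ [c]) := by
          intro h
          rcases List.prefix_concat_iff.mp h with heq | hpre
          · have : pfx = cs ∧ ('.' : Char) = c := by
              rw [← List.concat_eq_append, ← List.concat_eq_append] at heq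
              exact List.concat_inj.mp heq
            exact h3 ⟨this.2.symm, this.1⟩
          · exact h1 hpre
        simp [h1, h3, h4]


-- generic form of the key scan, over an arbitrary (index, char) list
theorem pvScanFold_length (ss : List String) (key t : String) (L : List (Int × Char))
    (bs : List (List String)) :
    (L.foldl (fun bs p =>
      if p.2 = '.' then
        ((pvB_pos ss).getD (PySem.Str.slice key none (some p.1)) []).foldl
          (fun bs i => PySem.List.pySetD bs i (PySem.List.pyGetD bs i [] ++ [t])) bs
      else bs) bs).length = bs.length := by
  induction L generalizing bs with
  | nil => rfl
  | cons p L ih =>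
    rw [List.foldl_cons, ih]
    by_cases hp : p.2 = '.'
    · rw [if_pos hp]; exact pvApply_length _ _ _
    · simp [hp]

theorem pvScanFold_getD (ss : List String) (key t : String) (L : List (Int × Char))
    (bs : List (List String)) (hlen : bs.length = ss.length) (k : Nat) (hk : k < ss.length) :
    (L.foldl (fun bs p =>
      if p.2 = '.' then
        ((pvB_pos ss).getD (PySem.Str.slice key none (some p.1)) []).foldl
          (fun bs i => PySem.List.pySetD bs i (PySem.List.pyGetD bs i [] ++ [t])) bs
      else bs) bs).getD k []
    = bs.getD k [] ++ List.replicate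
        (L.countP (fun p => decide (p.2 = '.') && decide (ss[k] = PySem.Str.slice key none (some p.1)))) t := by
  induction L generalizing bs with
  | nil => simp
  | cons p L ih =>
    rw [List.foldl_cons, List.countP_cons]
    by_cases hp : p.2 = '.'
    · rw [if_pos hp]
      set sec' := PySem.Str.slice key none (some p.1) with hsec
      have hbs' : ∀ i ∈ (pvB_pos ss).getD sec' [], ∃ m : Nat, i = (m : Int) ∧ m < bs.length := by
        intro i hi
        rw [pvB_pos_getD] at hi
        obtain ⟨m, rfl, hm⟩ := pvIdx_mem ss sec' i hi
        exact ⟨m, rfl, by omega⟩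
      have hlen' : (((pvB_pos ss).getD sec' []).foldl
          (fun bs i => PySem.List.pySetD bs i (PySem.List.pyGetD bs i [] ++ [t])) bs).length = ss.length := by
        rw [pvApply_length]; exact hlen
      rw [ih _ hlen', pvApply_getD _ _ _ hbs' k, pvB_pos_getD, pvIdx_count ss sec' k hk]
      have hcond : (decide (p.2 = '.') && decide (ss[k] = sec')) = decide (ss[k] = sec') := by simp [hp]
      rw [hcond, List.append_assoc]
      congr 1
      by_cases hq : ss[k] = sec' <;> simp [hq, List.replicate_succ]
    · have hb : (decide (p.2 = '.') && decide (ss[k] = PySem.Str.slice key none (some p.1))) = false := by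
        simp [hp]
      rw [if_neg hp, ih _ hlen, hb]
      simp

theorem pvB_scanKey_length (ss : List String) (key t : String) (bs : List (List String)) :
    (pvB_scanKey (pvB_pos ss) key t bs).length = bs.length := by
  unfold pvB_scanKey
  exact pvScanFold_length ss key t _ bs


theorem pvB_scanKey_getD (ss : List String) (key t : String) (bs : List (List String))
    (hlen : bs.length = ss.length) (k : Nat) (hk : k < ss.length) :
    (pvB_scanKey (pvB_pos ss) key t bs).getD k []
      = bs.getD k [] ++ (if PySem.Str.startswith key (ss[k] ++ ".") then [t] else []) := by
  unfold pvB_scanKey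
  rw [pvScanFold_getD ss key t _ bs hlen k hk]
  congr 1
  have hc : ((PySem.List.enumerate key.toList).countP
      (fun p => decide (p.2 = '.') && decide (ss[k] = PySem.Str.slice key none (some p.1))))
      = ((PySem.List.enumerate key.toList).countP
      (fun p => decide (p.2 = '.') && decide ((ss[k]).toList = PySem.Chars.slice key.toList none (some p.1)))) := by
    apply List.countP_congr
    intro p _
    simp only [← String.toList_inj, PySem.Str.toList_slice]
  rw [hc, pvDotCount key.toList (ss[k]).toList]
  rw [PySem.Str.startswith_eq, String.toList_append]
  have hdot : (".":String).toList = ['.'] := rfl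
  rw [hdot]
  by_cases h : (ss[k]).toList ++ ['.'] <+: key.toList
  · simp [h, PySem.Chars.startswith_iff]
  · simp [h, PySem.Chars.startswith_iff]


theorem pvB_buckets_length (st : List (String × String)) (ss : List String) :
    (pvB_buckets st ss).length = ss.length := by
  unfold pvB_buckets
  induction st using List.reverseRecOn with
  | nil => simp
  | append_singleton st kv ih =>
    rw [List.foldl_append, List.foldl_cons, List.foldl_nil, pvB_scanKey_length, ih]


theorem pvB_buckets_getD (st : List (String × String)) (ss : List String) (k : Nat)
    (hk : k < ss.length) :
    (pvB_buckets st ss).getD k []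
      = (st.filter (fun kv => PySem.Str.startswith kv.1 (ss[k] ++ "."))).map (·.2) := by
  induction st using List.reverseRecOn with
  | nil =>
    unfold pvB_buckets
    simp [List.getD_eq_getElem?_getD, hk]
  | append_singleton st kv ih =>
    have hstep : pvB_buckets (st ++ [kv]) ss = pvB_scanKey (pvB_pos ss) kv.1 kv.2 (pvB_buckets st ss) := by
      unfold pvB_buckets
      rw [List.foldl_append, List.foldl_cons, List.foldl_nil]
    rw [hstep, pvB_scanKey_getD ss kv.1 kv.2 _ (pvB_buckets_length st ss) k hk, ih]
    rw [List.filter_append, List.map_append]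
    congr 1
    by_cases h : PySem.Chars.startswith kv.1.toList ((ss[k]).toList ++ ['.']) = true
    · simp [h]
    · simp [h]


theorem pvA_texts_eq (st : List (String × String)) (ss : List String) :
    pvA_texts st ss = ss.flatMap (fun sec =>
      ((PySem.Dict.mk st).get? sec).toList
        ++ (st.filter (fun kv => PySem.Str.startswith kv.1 (sec ++ "."))).map (·.2)) := by
  unfold pvA_texts
  have hstep : ∀ (texts : List String) (sec : String), sec ∈ ss →
      st.foldl (fun texts kv =>
        if PySem.Str.startswith kv.1 (sec ++ ".") then texts ++ [kv.2] else texts)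
      (match (PySem.Dict.mk st).get? sec with
        | some t => texts ++ [t]
        | none => texts)
      = texts ++ (((PySem.Dict.mk st).get? sec).toList
          ++ (st.filter (fun kv => PySem.Str.startswith kv.1 (sec ++ "."))).map (·.2)) := by
    intro texts sec _
    rw [PySem.List.foldl_append_if (fun kv => PySem.Str.startswith kv.1 (sec ++ ".")) (·.2) st]
    cases (PySem.Dict.mk st).get? sec <;> simp
  have h2 : ss.foldl (fun texts sec =>
      st.foldl (fun texts kv =>
        if PySem.Str.startswith kv.1 (sec ++ ".") then texts ++ [kv.2] else texts)
      (match (PySem.Dict.mk st).get? sec with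
        | some t => texts ++ [t]
        | none => texts)) []
      = ss.foldl (fun texts sec => texts ++ (((PySem.Dict.mk st).get? sec).toList
          ++ (st.filter (fun kv => PySem.Str.startswith kv.1 (sec ++ "."))).map (·.2))) [] :=
    PySem.List.foldl_congr_mem _ _ _ _ hstep
  rw [h2]
  exact PySem.List.foldl_append_eq_flatMap _ ss []


theorem pvB_parts_eq (st : List (String × String)) (ss : List String) :
    pvB_parts st ss (pvB_buckets st ss) = ss.flatMap (fun sec =>
      ((PySem.Dict.mk st).get? sec).toList
        ++ (st.filter (fun kv => PySem.Str.startswith kv.1 (sec ++ "."))).map (·.2)) := by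
  unfold pvB_parts
  have hstep : ∀ (parts : List String) (p : Int × String), p ∈ PySem.List.enumerate ss →
      ((match (PySem.Dict.mk st).get? p.2 with
        | some t => parts ++ [t]
        | none => parts) ++ PySem.List.pyGetD (pvB_buckets st ss) p.1 [])
      = parts ++ (((PySem.Dict.mk st).get? p.2).toList
          ++ (st.filter (fun kv => PySem.Str.startswith kv.1 (p.2 ++ "."))).map (·.2)) := by
    intro parts p hp
    rw [PySem.List.mem_enumerate_iff] at hp
    obtain ⟨k, hk, rfl⟩ := hp
    have h1 : PySem.List.pyGetD (pvB_buckets st ss) ((0:Int) + (k:Int)) []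
        = (st.filter (fun kv => PySem.Str.startswith kv.1 (ss[k] ++ "."))).map (·.2) := by
      rw [zero_add, PySem.List.pyGetD_natCast]
      exact pvB_buckets_getD st ss k hk
    rw [h1]
    cases (PySem.Dict.mk st).get? (((0:Int) + (k:Int), ss[k]) : Int × String).2 <;> simp
  have h2 : (PySem.List.enumerate ss).foldl (fun parts p =>
      (match (PySem.Dict.mk st).get? p.2 with
        | some t => parts ++ [t]
        | none => parts) ++ PySem.List.pyGetD (pvB_buckets st ss) p.1 []) []
      = (PySem.List.enumerate ss).foldl (fun parts p =>
          parts ++ (((PySem.Dict.mk st).get? p.2).toList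
          ++ (st.filter (fun kv => PySem.Str.startswith kv.1 (p.2 ++ "."))).map (·.2))) [] :=
    PySem.List.foldl_congr_mem _ _ _ _ hstep
  rw [h2]
  rw [PySem.List.foldl_append_eq_flatMap _ _ []]
  rw [List.flatMap_def, List.flatMap_def]
  have hmm : (PySem.List.enumerate ss).map (fun p =>
      ((PySem.Dict.mk st).get? p.2).toList
        ++ (st.filter (fun kv => PySem.Str.startswith kv.1 (p.2 ++ "."))).map (·.2))
      = ((PySem.List.enumerate ss).map (fun p => p.2)).map (fun sec =>
      ((PySem.Dict.mk st).get? sec).toList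
        ++ (st.filter (fun kv => PySem.Str.startswith kv.1 (sec ++ "."))).map (·.2)) := by
    rw [List.map_map]; rfl
  rw [hmm, PySem.List.map_snd_enumerate]
  simp


theorem pv_texts_parts (st : List (String × String)) (ss : List String) :
    pvB_parts st ss (pvB_buckets st ss) = pvA_texts st ss := by
  rw [pvA_texts_eq, pvB_parts_eq]

-- ===== VERDICT (by name: the statement is the Claim_ definition above) =====
theorem find_text_for_sections_py_spec : Claim_equal_find_text_for_sections_py := by
  intro st ss kw _
  unfold Spec_find_text_for_sections_py find_text_for_sections_py find_text_for_sections_py_alt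
  show (let combined := PySem.Str.join " " (pvA_texts st ss);
    match kw with
    | none => combined
    | some kws =>
      if (!kws.isEmpty && PySem.Str.strip combined == "") = true then pvTitleTail st kws combined else combined) = _
  simp only [pv_texts_parts]
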